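-- pv_equiv track=rewrite | github.com/successbyfailure/Mimosa | mimosanpm-agent/mimosanpm_agent/log_watcher.py | _extract_host
-- ===== SOURCE A (Python) =====
-- def _extract_host(rest: str) -> str | None:
--     tokens = [token for token in rest.strip().split() if token and token != "-"]
--     for token in tokens:
--         if token.startswith("host="):
--             return token.split("=", 1)[1]
--     for token in tokens:
--         if "." in token and not token.replace(".", "").isdigit():
--             return token
--     return None
-- ===== SOURCE B (Python) =====
-- def _extract_host(rest: str) -> str | None:
--     fallback = None
--     for token in rest.strip().split():
--         if token == "-":
--             continue
--         if token.startswith("host="):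
--             return token[5:]
--         if fallback is None and "." in token and not token.replace(".", "").isdigit():
--             fallback = token
--     return fallback
-- ===== Notes on version B (the rewrite author's own statement) =====
-- stated objective: alternative
-- what changed: A makes two ordered passes over the pre-filtered token list (first looking for a host= token, then for a dotted non-numeric token); B is a single scan that returns immediately on a host= token and keeps a once-set fallback for the first dotted non-numeric token, skipping dash placeholder tokens inline instead of pre-filtering, and takes the host value as the slice after the prefix instead of splitting at the first equals sign.
import Mathlib
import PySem

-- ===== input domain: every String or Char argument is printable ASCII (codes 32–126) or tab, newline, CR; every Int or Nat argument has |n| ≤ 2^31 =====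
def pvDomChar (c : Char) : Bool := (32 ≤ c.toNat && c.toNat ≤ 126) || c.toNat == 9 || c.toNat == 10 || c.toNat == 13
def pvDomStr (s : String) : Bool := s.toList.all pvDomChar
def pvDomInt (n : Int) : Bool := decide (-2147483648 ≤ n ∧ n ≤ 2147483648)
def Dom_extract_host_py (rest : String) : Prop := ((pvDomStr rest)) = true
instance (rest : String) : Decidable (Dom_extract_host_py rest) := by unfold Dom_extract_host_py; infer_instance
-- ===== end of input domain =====

-- B replaces A's two ordered passes over the token list by a single scan with a once-set
-- fallback accumulator and immediate return on 'host=' (objective: alternative decomposition).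

-- ===== PORT A =====
-- tokens = [token for token in rest.strip().split() if token and token != "-"]
def pvTokens (rest : String) : List String :=
  (PySem.Str.split₀ (PySem.Str.strip rest)).filter (fun t => !(t == "") && !(t == "-"))

-- first for-loop: return token.split("=", 1)[1] on the first token starting with "host="
-- (the .getD fallbacks are unreachable: sep "=" is nonempty and "=" occurs in the token)
def pvHostLoop : List String → Option String
  | [] => none
  | t :: ts =>
    if PySem.Str.startswith t "host=" then
      some ((PySem.List.pyGet? ((PySem.Str.splitMax? t "=" 1).getD []) 1).getD "")
    else pvHostLoop ts

-- second for-loop: first token with "." in it whose dot-stripped form is not all digits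
def pvDotLoop : List String → Option String
  | [] => none
  | t :: ts =>
    if PySem.Str.isIn "." t && !(PySem.Str.strIsdigit (PySem.Str.replace t "." "")) then some t
    else pvDotLoop ts

def extract_host_py (rest : String) : Option String :=
  let tokens := pvTokens rest
  match pvHostLoop tokens with
  | some v => some v
  | none => pvDotLoop tokens

-- ===== PORT B =====
-- single pass over rest.strip().split() carrying the once-set fallback
def pvGoB : List String → Option String → Option String
  | [], fb => fb
  | t :: ts, fb =>
    if t == "-" then pvGoB ts fb
    else if PySem.Str.startswith t "host=" then some (PySem.Str.slice t (some 5) none)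
    else pvGoB ts
      (if fb.isNone && PySem.Str.isIn "." t
          && !(PySem.Str.strIsdigit (PySem.Str.replace t "." "")) then some t else fb)

def extract_host_py_alt (rest : String) : Option String :=
  pvGoB (PySem.Str.split₀ (PySem.Str.strip rest)) none

-- ===== PRECONDITION & SPEC =====
def Spec_extract_host_py (rest : String) (out : Option String) : Prop := out = extract_host_py_alt rest
instance (rest : String) (out : Option String) : Decidable (Spec_extract_host_py rest out) := by unfold Spec_extract_host_py; infer_instance

-- ===== CLAIM (what is proved, stated in full; the proofs are below) =====
def Claim_equal_extract_host_py : Prop := ∀ (rest : String), Dom_extract_host_py rest → Spec_extract_host_py rest (extract_host_py rest)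

-- ===== LEMMAS AND PROOFS =====

theorem go_zero (sep : List Char) (fuel : Nat) (l cur : List Char) (acc : List (List Char)) :
    PySem.Chars.splitOnMax.go sep fuel 0 l cur acc = ((cur.reverse ++ l) :: acc).reverse := by
  cases fuel <;> cases l <;> simp [PySem.Chars.splitOnMax.go]

theorem go_step (sep : List Char) (fuel m : Nat) (c : Char) (l cur : List Char)
    (acc : List (List Char)) (hm : m ≠ 0) (h : sep.isPrefixOf (c :: l) = false) :
    PySem.Chars.splitOnMax.go sep (fuel + 1) m (c :: l) cur acc
      = PySem.Chars.splitOnMax.go sep fuel m l (c :: cur) acc := by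
  simp [PySem.Chars.splitOnMax.go, hm, h]

theorem go_match (sep : List Char) (fuel m : Nat) (c : Char) (l cur : List Char)
    (acc : List (List Char)) (hm : m ≠ 0) (h : sep.isPrefixOf (c :: l) = true) :
    PySem.Chars.splitOnMax.go sep (fuel + 1) m (c :: l) cur acc
      = PySem.Chars.splitOnMax.go sep fuel (m - 1) ((c :: l).drop sep.length) [] (cur.reverse :: acc) := by
  simp [PySem.Chars.splitOnMax.go, hm, h]

theorem split_host (r : List Char) :
    PySem.Chars.splitOnMax ('h' :: 'o' :: 's' :: 't' :: '=' :: r) ['='] 1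
      = [['h', 'o', 's', 't'], r] := by
  unfold PySem.Chars.splitOnMax
  have h1 : ¬ ((1:Int) < 0) := by norm_num
  simp only [if_neg h1, List.length_cons, Int.toNat_one]
  rw [go_step _ _ _ _ _ _ _ (by decide) (by simp [List.isPrefixOf])]
  rw [go_step _ _ _ _ _ _ _ (by decide) (by simp [List.isPrefixOf])]
  rw [go_step _ _ _ _ _ _ _ (by decide) (by simp [List.isPrefixOf])]
  rw [go_step _ _ _ _ _ _ _ (by decide) (by simp [List.isPrefixOf])]
  rw [go_match _ _ _ _ _ _ _ (by decide) (by simp [List.isPrefixOf])]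
  simp [go_zero]

theorem extract_eq (t : String) (h : PySem.Str.startswith t "host=" = true) :
    (PySem.List.pyGet? ((PySem.Str.splitMax? t "=" 1).getD []) 1).getD ""
      = PySem.Str.slice t (some 5) none := by
  have h' : PySem.Chars.startswith t.toList "host=".toList = true := by simpa using h
  obtain ⟨r, ht⟩ := (PySem.Chars.startswith_iff _ _).mp h'
  have hsplit : PySem.Chars.splitMax? t.toList ['='] 1 = some [['h','o','s','t'], r] := by
    rw [← ht]
    simp [PySem.Chars.splitMax?]
    exact split_host r
  have hmap := PySem.Str.splitMax?_map t "=" 1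
  rw [show ("=" : String).toList = ['='] from rfl] at hmap
  rw [hsplit] at hmap
  cases hL : PySem.Str.splitMax? t "=" 1 with
  | none => rw [hL] at hmap; simp at hmap
  | some L =>
    rw [hL] at hmap
    simp at hmap
    rcases L with _ | ⟨a, _ | ⟨b, _ | _⟩⟩ <;> simp at hmap
    obtain ⟨ha, hb⟩ := hmap
    apply String.toList_inj.mp
    simp [PySem.List.pyGet?, PySem.List.pyIdx?, hb, PySem.Str.toList_slice,
      PySem.Chars.slice_eq_listSlice, ← ht]
    rw [show ((5:Int)) = ((5:Nat):Int) from rfl, PySem.List.slice_from_natCast]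
    rfl

theorem goB_eq (ts : List String) (fb : Option String) :
    pvGoB ts fb
      = (match pvHostLoop (ts.filter (fun t => !(t == "") && !(t == "-"))) with
         | some v => some v
         | none => match fb with
           | some x => some x
           | none => pvDotLoop (ts.filter (fun t => !(t == "") && !(t == "-")))) := by
  induction ts generalizing fb with
  | nil => cases fb <;> simp [pvGoB, pvHostLoop, pvDotLoop]
  | cons t ts ih =>
    by_cases hdash : t = "-"
    · subst hdash
      simp [pvGoB, ih]
    · by_cases hhost : PySem.Chars.startswith t.toList ['h', 'o', 's', 't', '='] = true
      · have hhost' : PySem.Str.startswith t "host=" = true := by simpa using hhost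
        have hne : t ≠ "" := by
          intro he; subst he; revert hhost; decide
        simp [pvGoB, pvHostLoop, hdash, hne, hhost, extract_eq t hhost']
      · by_cases hemp : t = ""
        · subst hemp
          have e1 : PySem.Chars.startswith ([] : List Char) ['h', 'o', 's', 't', '='] = false := by decide
          have e2 : PySem.Chars.isIn ['.'] ([] : List Char) = false := by decide
          cases fb <;>
            simp [pvGoB, ih, e1, e2]
        · by_cases hdot : PySem.Chars.isIn ['.'] t.toList = true ∧
              PySem.Chars.strIsdigit (PySem.Chars.replace t.toList ['.'] []) = false
          · cases fb with
            | none => simp [pvGoB, pvHostLoop, pvDotLoop, hdash, hemp, hhost, hdot, ih]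
            | some x => simp [pvGoB, pvHostLoop, hdash, hemp, hhost, hdot, ih]
          · cases fb with
            | none => simp [pvGoB, pvHostLoop, pvDotLoop, hdash, hemp, hhost, hdot, ih]
            | some x => simp [pvGoB, pvHostLoop, hdash, hemp, hhost, ih]

theorem extract_host_py_spec : Claim_equal_extract_host_py := by
  intro rest _
  unfold Spec_extract_host_py extract_host_py extract_host_py_alt pvTokens
  rw [goB_eq]
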